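-- pv_equiv track=rewrite | github.com/fangzheng123/TEBNER | run_model/run_bert_pipeline.py | combine_boundary_result
-- ===== SOURCE A (Python) =====
-- def combine_boundary_result(pred_in_word_list, pred_in_sent_list):
--     """
--     融合边界结果
--     :param pred_in_word_list:
--     :param pred_in_sent_list:
--     :return:
--     """
--     pred_word_begin_end_dict = {entity[1]: entity[2] for entity in pred_in_word_list}
--     pred_sent_begin_end_dict = {entity[1]: entity[2] for entity in pred_in_sent_list}
--
--     # 结果融合
--     all_begin_end_dict = {}
--     for begin, end in pred_word_begin_end_dict.items():
--         all_begin_end_dict.setdefault(begin, {}).setdefault(end, []).append(1)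
--     for begin, end in pred_sent_begin_end_dict.items():
--         all_begin_end_dict.setdefault(begin, {}).setdefault(end, []).append(1)
--
--     filter_begin_end_dict = {}
--     for begin, end_dict in all_begin_end_dict.items():
--         sort_end_list = sorted(end_dict.items(), key=lambda x:sum(x[1]), reverse=True)
--         if sum(sort_end_list[0][1]) > 1:
--             filter_begin_end_dict[begin] = sort_end_list[0][0]
--
--     pred_all_list = [("", begin, end, 0) for begin, end in filter_begin_end_dict.items()]
--
--     return pred_all_list
-- ===== SOURCE B (Python) =====
-- def combine_boundary_result(pred_in_word_list, pred_in_sent_list):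
--     """Keep a begin iff the word-level and sent-level dicts agree on its end."""
--     word_begin_end = {entity[1]: entity[2] for entity in pred_in_word_list}
--     sent_begin_end = {entity[1]: entity[2] for entity in pred_in_sent_list}
--     return [("", begin, end, 0)
--             for begin, end in word_begin_end.items()
--             if sent_begin_end.get(begin) == end]
-- ===== Notes on version B (the rewrite author's own statement) =====
-- stated objective: simpler
-- what changed: Dropped the nested count-dict and the per-begin sorted() pass: B builds the same two begin->end dicts and emits, in word-dict order, the begins on which the sent dict agrees on the end (count>1 in A happens exactly there).
import Mathlib
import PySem

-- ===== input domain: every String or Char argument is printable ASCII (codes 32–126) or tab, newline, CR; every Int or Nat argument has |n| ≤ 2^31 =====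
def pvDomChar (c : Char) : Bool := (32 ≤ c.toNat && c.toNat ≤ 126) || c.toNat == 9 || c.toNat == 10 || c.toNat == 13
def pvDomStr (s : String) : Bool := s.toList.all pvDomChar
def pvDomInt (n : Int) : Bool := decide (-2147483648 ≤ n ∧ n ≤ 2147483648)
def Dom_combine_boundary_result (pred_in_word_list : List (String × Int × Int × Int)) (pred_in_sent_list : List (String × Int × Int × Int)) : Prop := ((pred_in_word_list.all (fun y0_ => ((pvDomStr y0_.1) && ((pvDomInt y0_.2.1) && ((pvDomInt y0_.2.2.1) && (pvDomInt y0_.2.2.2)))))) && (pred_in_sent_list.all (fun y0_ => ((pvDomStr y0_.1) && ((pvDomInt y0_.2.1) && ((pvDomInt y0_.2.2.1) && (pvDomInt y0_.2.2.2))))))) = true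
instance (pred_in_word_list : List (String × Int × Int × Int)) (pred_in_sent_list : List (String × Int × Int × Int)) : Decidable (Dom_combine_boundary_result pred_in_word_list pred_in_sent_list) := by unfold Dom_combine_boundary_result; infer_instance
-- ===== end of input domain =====

-- B replaces A's nested count-dict and per-begin sorted() pass by one filter over the
-- word dict, keeping the begins on which the sent dict agrees on the end (simpler; same cost).

-- ===== PORT A =====
def combine_boundary_result (pred_in_word_list : List (String × Int × Int × Int)) (pred_in_sent_list : List (String × Int × Int × Int)) : List (String × Int × Int × Int) :=
  let pred_word_begin_end_dict : PySem.Dict Int Int :=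
    pred_in_word_list.foldl (fun d entity => d.insert entity.2.1 entity.2.2.1) PySem.Dict.empty
  let pred_sent_begin_end_dict : PySem.Dict Int Int :=
    pred_in_sent_list.foldl (fun d entity => d.insert entity.2.1 entity.2.2.1) PySem.Dict.empty
  -- all_begin_end_dict.setdefault(begin, {}).setdefault(end, []).append(1) mutates the nested
  -- dict in place; functionally: all[begin] = all.get(begin, {}) updated with end ↦ get(end, []) ++ [1]
  let all0 : PySem.Dict Int (PySem.Dict Int (List Int)) :=
    pred_word_begin_end_dict.items.foldl
      (fun d p => d.modify p.1 PySem.Dict.empty (fun inner => inner.modify p.2 [] (· ++ [1])))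
      PySem.Dict.empty
  let all_begin_end_dict : PySem.Dict Int (PySem.Dict Int (List Int)) :=
    pred_sent_begin_end_dict.items.foldl
      (fun d p => d.modify p.1 PySem.Dict.empty (fun inner => inner.modify p.2 [] (· ++ [1])))
      all0
  let filter_begin_end_dict : PySem.Dict Int Int :=
    all_begin_end_dict.items.foldl
      (fun fd p =>
        -- sort_end_list[0]: the inner dicts are never empty, so the [] branch is unreachable
        -- (Python would raise IndexError there)
        match PySem.List.sorted p.2.items (fun x => x.2.sum) true with
        | [] => fd
        | q :: _ => if q.2.sum > 1 then fd.insert p.1 q.1 else fd)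
      PySem.Dict.empty
  filter_begin_end_dict.items.map (fun p => (("" : String), p.1, p.2, (0 : Int)))

-- ===== PORT B =====
def combine_boundary_result_alt (pred_in_word_list : List (String × Int × Int × Int)) (pred_in_sent_list : List (String × Int × Int × Int)) : List (String × Int × Int × Int) :=
  let word_begin_end : PySem.Dict Int Int :=
    pred_in_word_list.foldl (fun d entity => d.insert entity.2.1 entity.2.2.1) PySem.Dict.empty
  let sent_begin_end : PySem.Dict Int Int :=
    pred_in_sent_list.foldl (fun d entity => d.insert entity.2.1 entity.2.2.1) PySem.Dict.empty
  (word_begin_end.items.filter (fun p => sent_begin_end.get? p.1 == some p.2)).map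
    (fun p => (("" : String), p.1, p.2, (0 : Int)))

-- ===== PRECONDITION & SPEC =====
def Spec_combine_boundary_result (pred_in_word_list : List (String × Int × Int × Int)) (pred_in_sent_list : List (String × Int × Int × Int)) (out : List (String × Int × Int × Int)) : Prop := out = combine_boundary_result_alt pred_in_word_list pred_in_sent_list
instance (pred_in_word_list : List (String × Int × Int × Int)) (pred_in_sent_list : List (String × Int × Int × Int)) (out : List (String × Int × Int × Int)) : Decidable (Spec_combine_boundary_result pred_in_word_list pred_in_sent_list out) := by unfold Spec_combine_boundary_result; infer_instance

-- ===== CLAIM (what is proved, stated in full; the proofs are below) =====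
def Claim_equal_combine_boundary_result : Prop := ∀ (pred_in_word_list : List (String × Int × Int × Int)) (pred_in_sent_list : List (String × Int × Int × Int)), Dom_combine_boundary_result pred_in_word_list pred_in_sent_list → Spec_combine_boundary_result pred_in_word_list pred_in_sent_list (combine_boundary_result pred_in_word_list pred_in_sent_list)

-- ===== LEMMAS AND PROOFS =====

-- proof-side names for the intermediate values of A's three loops
def pvG1 (p : Int × Int) : Int × PySem.Dict Int (List Int) :=
  (p.1, PySem.Dict.mk [(p.2, [1])])

def pvU (sl : List (Int × Int)) (p : Int × PySem.Dict Int (List Int)) :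
    Int × PySem.Dict Int (List Int) :=
  match sl.find? (fun q => q.1 == p.1) with
  | some q => (p.1, p.2.modify q.2 [] (· ++ [1]))
  | none => p

def pvPick (p : Int × PySem.Dict Int (List Int)) : Option (Int × Int) :=
  match PySem.List.sorted p.2.items (fun x => x.2.sum) true with
  | [] => none
  | q :: _ => if q.2.sum > 1 then some (p.1, q.1) else none

-- one merge step at a begin not yet present appends (b, {e: [1]})
theorem pv_step_fresh (d : PySem.Dict Int (PySem.Dict Int (List Int))) (b e : Int)
    (h : d.contains b = false) :
    (d.modify b PySem.Dict.empty (fun inner => inner.modify e [] (· ++ [1]))).items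
      = d.items ++ [(b, PySem.Dict.mk [(e, [1])])] := by
  rw [PySem.Dict.modify, PySem.Dict.getD_of_not_contains _ _ h,
      PySem.Dict.items_insert_of_not_contains _ _ h]
  simp [PySem.Dict.modify, PySem.Dict.insert, PySem.Dict.getD, PySem.Dict.get?,
        PySem.Dict.contains, PySem.Dict.empty]

-- Loop 1 (over the word dict's items): every key is fresh, so each step appends (b, {e: [1]}).
theorem pv_loop1_items (wl : List (Int × Int)) :
    ∀ d : PySem.Dict Int (PySem.Dict Int (List Int)),
      (∀ p ∈ wl, d.contains p.1 = false) → (wl.map (·.1)).Nodup →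
      (wl.foldl
        (fun d p => d.modify p.1 PySem.Dict.empty (fun inner => inner.modify p.2 [] (· ++ [1]))) d).items
      = d.items ++ wl.map pvG1 := by
  induction wl with
  | nil => intro d _ _; simp
  | cons hd tl ih =>
    intro d hfresh hnd
    have hhd : d.contains hd.1 = false := hfresh hd (by simp)
    have hstep := pv_step_fresh d hd.1 hd.2 hhd
    have hfresh' : ∀ p ∈ tl,
        (d.modify hd.1 PySem.Dict.empty (fun inner => inner.modify hd.2 [] (· ++ [1]))).contains p.1 = false := by
      intro p hp
      rw [PySem.Dict.contains_modify]
      have hmap : (hd.1 :: tl.map (·.1)).Nodup := by simpa using hnd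
      have h1 : p.1 ≠ hd.1 := fun hc =>
        (List.nodup_cons.mp hmap).1 (hc ▸ List.mem_map_of_mem hp)
      simp [h1, hfresh p (List.mem_cons_of_mem _ hp)]
    have hmap : (hd.1 :: tl.map (·.1)).Nodup := by simpa using hnd
    have := ih _ hfresh' (List.nodup_cons.mp hmap).2
    simp only [List.foldl_cons, List.map_cons]
    rw [this, hstep]
    simp [pvG1]

-- Loop 2 (over the sent dict's items): an existing begin's inner dict gets its end appended
-- in place; a fresh begin appends a new (b, {e: [1]}) entry.
theorem pv_loop2_items (sl : List (Int × Int)) :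
    ∀ d : PySem.Dict Int (PySem.Dict Int (List Int)),
      (sl.map (·.1)).Nodup → d.keys.Nodup →
      (sl.foldl
        (fun d p => d.modify p.1 PySem.Dict.empty (fun inner => inner.modify p.2 [] (· ++ [1]))) d).items
      = d.items.map (pvU sl)
        ++ (sl.filter (fun q => !d.contains q.1)).map pvG1 := by
  induction sl with
  | nil =>
    intro d _ _
    have : pvU ([] : List (Int × Int)) = id := funext fun p => by simp [pvU]
    simp [this]
  | cons q tl ih =>
    intro d hnd hdk
    have hmap : (q.1 :: tl.map (·.1)).Nodup := by simpa using hnd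
    have hq1 : q.1 ∉ tl.map (·.1) := (List.nodup_cons.mp hmap).1
    have hfind_tl_none : tl.find? (fun r => r.1 == q.1) = none := by
      rw [List.find?_eq_none]
      intro x hx hbe
      exact hq1 ((beq_iff_eq.mp hbe) ▸ List.mem_map_of_mem hx)
    simp only [List.foldl_cons]
    set f : PySem.Dict Int (List Int) → PySem.Dict Int (List Int) :=
      (fun inner => inner.modify q.2 [] (· ++ [1])) with hf
    by_cases hc : d.contains q.1 = true
    · -- existing key: entry updated in place
      have hitems : (d.modify q.1 PySem.Dict.empty f).items
          = d.items.map (fun p => if p.1 == q.1 then (q.1, f (d.getD q.1 PySem.Dict.empty)) else p) := by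
        rw [PySem.Dict.modify, PySem.Dict.items_insert_of_contains _ _ hc]
      have hkeys : (d.modify q.1 PySem.Dict.empty f).keys = d.keys := by
        rw [PySem.Dict.keys_modify, PySem.Dict.keys_insert_of_contains _ _ hc]
      have ihd := ih (d.modify q.1 PySem.Dict.empty f) (by simpa using hnd.of_cons) (hkeys ▸ hdk)
      rw [ihd, hitems, List.map_map]
      congr 1
      · apply List.map_congr_left
        rintro ⟨p1, p2⟩ hp
        by_cases hpq : p1 = q.1
        · subst hpq
          have hget : d.getD q.1 PySem.Dict.empty = p2 :=
            PySem.Dict.getD_of_mem_items _ hp hdk _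
          simp [pvU, hfind_tl_none, hget, hf]
        · have hbeq' : (q.1 == p1) = false := beq_eq_false_iff_ne.mpr (Ne.symm hpq)
          simp [pvU, hpq, hbeq']
      · have hcont : ∀ x ∈ tl, (!(d.modify q.1 PySem.Dict.empty f).contains x.1) = (!d.contains x.1) := by
          intro x hx
          rw [PySem.Dict.contains_modify]
          have : (x.1 == q.1) = false := beq_eq_false_iff_ne.mpr
            (fun hh => hq1 (hh ▸ List.mem_map_of_mem hx))
          simp [this]
        rw [List.filter_congr hcont, List.filter_cons]
        simp [hc]
    · -- fresh key: entry appended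
      have hc' : d.contains q.1 = false := by simpa using hc
      have hnotmem : q.1 ∉ d.keys := by
        intro hm
        rw [← PySem.Dict.contains_iff_mem_keys] at hm
        simp [hm] at hc'
      have hitems := pv_step_fresh d q.1 q.2 hc'
      have hkeys : (d.modify q.1 PySem.Dict.empty f).keys = d.keys ++ [q.1] := by
        show ((d.modify q.1 PySem.Dict.empty f).items.map (·.1)) = (d.items.map (·.1)) ++ [q.1]
        rw [hitems]; simp
      have hknd : (d.modify q.1 PySem.Dict.empty f).keys.Nodup := by
        rw [hkeys, List.nodup_append]
        refine ⟨hdk, List.nodup_singleton _, ?_⟩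
        intro a ha b hb
        have hb' : b = q.1 := by simpa using hb
        exact fun hab => hnotmem ((hab.trans hb') ▸ ha)
      have ihd := ih (d.modify q.1 PySem.Dict.empty f) (by simpa using hnd.of_cons) hknd
      rw [ihd, hitems, List.map_append]
      have hmapold : d.items.map (pvU tl) = d.items.map (pvU (q :: tl)) := by
        apply List.map_congr_left
        rintro ⟨p1, p2⟩ hp
        have : (q.1 == p1) = false := by
          apply beq_eq_false_iff_ne.mpr
          intro hh
          exact hnotmem (hh ▸ List.mem_map_of_mem hp)
        simp only [pvU, List.find?_cons, this]
      have hmapnew : [((q.1 : Int), PySem.Dict.mk [(q.2, ([1] : List Int))])].map (pvU tl)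
          = [(q.1, PySem.Dict.mk [(q.2, [1])])] := by
        simp only [List.map_cons, List.map_nil, pvU, hfind_tl_none]
      have hcont : ∀ x ∈ tl, (!(d.modify q.1 PySem.Dict.empty f).contains x.1) = (!d.contains x.1) := by
        intro x hx
        rw [PySem.Dict.contains_modify]
        have : (x.1 == q.1) = false := beq_eq_false_iff_ne.mpr
          (fun hh => hq1 (hh ▸ List.mem_map_of_mem hx))
        simp [this]
      rw [List.filter_congr hcont, hmapold, hmapnew, List.filter_cons]
      simp [hc', pvG1]

-- Loop 3 (the filter loop): each conditional insert is at the entry's own (fresh) key.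
theorem pv_loop3_items (al : List (Int × PySem.Dict Int (List Int))) :
    ∀ fd : PySem.Dict Int Int,
      (∀ p ∈ al, fd.contains p.1 = false) → (al.map (·.1)).Nodup →
      (al.foldl
        (fun fd p =>
          match PySem.List.sorted p.2.items (fun x => x.2.sum) true with
          | [] => fd
          | q :: _ => if q.2.sum > 1 then fd.insert p.1 q.1 else fd) fd).items
      = fd.items ++ al.filterMap pvPick := by
  induction al with
  | nil => intro fd _ _; simp
  | cons p tl ih =>
    intro fd hfresh hnd
    have hmap : (p.1 :: tl.map (·.1)).Nodup := by simpa using hnd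
    have hp1 : p.1 ∉ tl.map (·.1) := (List.nodup_cons.mp hmap).1
    simp only [List.foldl_cons, List.filterMap_cons]
    rcases hs : PySem.List.sorted p.2.items (fun x => x.2.sum) true with _ | ⟨q, rest⟩
    · have hpick : pvPick p = none := by unfold pvPick; rw [hs]
      simp only [hpick]
      exact ih fd (fun x hx => hfresh x (List.mem_cons_of_mem _ hx)) (List.nodup_cons.mp hmap).2
    · have hpick : pvPick p = if q.2.sum > 1 then some (p.1, q.1) else none := by
        unfold pvPick; rw [hs]
      simp only [hpick]
      by_cases hgt : q.2.sum > 1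
      · have hcp : fd.contains p.1 = false := hfresh p (by simp)
        have hfresh' : ∀ x ∈ tl, (fd.insert p.1 q.1).contains x.1 = false := by
          intro x hx
          rw [PySem.Dict.contains_insert]
          have h1 : (x.1 == p.1) = false := beq_eq_false_iff_ne.mpr
            (fun hh => hp1 (hh ▸ List.mem_map_of_mem hx))
          simp [h1, hfresh x (List.mem_cons_of_mem _ hx)]
        rw [if_pos hgt, if_pos hgt, ih _ hfresh' (List.nodup_cons.mp hmap).2,
            PySem.Dict.items_insert_of_not_contains _ _ hcp]
        simp
      · rw [if_neg hgt, if_neg hgt]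
        simpa using ih fd (fun x hx => hfresh x (List.mem_cons_of_mem _ hx)) (List.nodup_cons.mp hmap).2

theorem pv_filterMap_if {α β : Type} (l : List α) (c : α → Bool) (g : α → β) :
    l.filterMap (fun a => if c a then some (g a) else none) = (l.filter c).map g := by
  induction l with
  | nil => rfl
  | cons hd tl ih => by_cases h : c hd <;> simp [h, ih]

-- single-element and equal-key two-element stable sorts are the identity
theorem pv_sorted_single (a : Int × List Int) :
    PySem.List.sorted [a] (fun x => x.2.sum) true = [a] := by
  simp [PySem.List.sorted, PySem.List.insertBy]

theorem pv_sorted_pair (a b : Int × List Int) (h : a.2.sum = b.2.sum) :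
    PySem.List.sorted [a, b] (fun x => x.2.sum) true = [a, b] := by
  simp [PySem.List.sorted, PySem.List.insertBy, h]

-- a begin seen only in the sent loop carries a single count and is filtered out
theorem pv_pick_single (q : Int × Int) : pvPick (pvG1 q) = none := by
  show pvPick (q.1, PySem.Dict.mk [(q.2, [1])]) = none
  rw [pvPick, show (PySem.Dict.mk [(q.2, ([1] : List Int))]).items = [(q.2, [1])] from rfl,
      pv_sorted_single]
  simp

-- the per-begin pick after both merge loops equals B's agreement test
theorem pv_pointwise (sl : List (Int × Int)) (p : Int × Int) :
    pvPick (pvU sl (pvG1 p))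
    = (if ((PySem.Dict.mk sl).get? p.1 == some p.2) then some (p.1, p.2) else none) := by
  rcases hf : sl.find? (fun q => q.1 == p.1) with _ | q
  · have hget : (PySem.Dict.mk sl).get? p.1 = none := by
      simp [PySem.Dict.get?, hf]
    rw [show pvU sl (pvG1 p) = pvG1 p by simp [pvU, pvG1, hf], pv_pick_single, hget]
    simp
  · have hget : (PySem.Dict.mk sl).get? p.1 = some q.2 := by
      simp [PySem.Dict.get?, hf]
    have hu : pvU sl (pvG1 p)
        = (p.1, (PySem.Dict.mk [(p.2, ([1] : List Int))]).modify q.2 [] (· ++ [1])) := by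
      simp [pvU, pvG1, hf]
    rw [hu, hget]
    by_cases hqe : q.2 = p.2
    · have hinner : (PySem.Dict.mk [(p.2, ([1] : List Int))]).modify q.2 [] (· ++ [1])
          = PySem.Dict.mk [(p.2, [1, 1])] := by
        rw [hqe]
        simp [PySem.Dict.modify, PySem.Dict.insert, PySem.Dict.getD, PySem.Dict.get?,
              PySem.Dict.contains]
      rw [hinner, pvPick,
          show (PySem.Dict.mk [(p.2, ([1, 1] : List Int))]).items = [(p.2, [1, 1])] from rfl,
          pv_sorted_single]
      simp [hqe]
    · have hb : (p.2 == q.2) = false := beq_eq_false_iff_ne.mpr (Ne.symm hqe)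
      have hinner : (PySem.Dict.mk [(p.2, ([1] : List Int))]).modify q.2 [] (· ++ [1])
          = PySem.Dict.mk [(p.2, [1]), (q.2, [1])] := by
        simp [PySem.Dict.modify, PySem.Dict.insert, PySem.Dict.getD, PySem.Dict.get?,
              PySem.Dict.contains, hb]
      rw [hinner, pvPick,
          show (PySem.Dict.mk [(p.2, ([1] : List Int)), (q.2, [1])]).items
            = [(p.2, [1]), (q.2, [1])] from rfl,
          pv_sorted_pair _ _ (by simp)]
      simp [hqe]

-- ===== VERDICT (by name: the statement is the Claim_ definition above) =====
theorem combine_boundary_result_spec : Claim_equal_combine_boundary_result := by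
  intro w s _
  unfold Spec_combine_boundary_result
  have hA : combine_boundary_result w s =
      ((((s.foldl (fun d entity => d.insert entity.2.1 entity.2.2.1) PySem.Dict.empty).items.foldl
          (fun d p => d.modify p.1 PySem.Dict.empty (fun inner => inner.modify p.2 [] (· ++ [1])))
          ((w.foldl (fun d entity => d.insert entity.2.1 entity.2.2.1) PySem.Dict.empty).items.foldl
            (fun d p => d.modify p.1 PySem.Dict.empty (fun inner => inner.modify p.2 [] (· ++ [1])))
            (PySem.Dict.empty : PySem.Dict Int (PySem.Dict Int (List Int))))).items.foldl
        (fun fd p =>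
          match PySem.List.sorted p.2.items (fun x => x.2.sum) true with
          | [] => fd
          | q :: _ => if q.2.sum > 1 then fd.insert p.1 q.1 else fd)
        PySem.Dict.empty).items.map (fun p => (("" : String), p.1, p.2, (0 : Int)))) := rfl
  have hB : combine_boundary_result_alt w s =
      (((w.foldl (fun d entity => d.insert entity.2.1 entity.2.2.1) PySem.Dict.empty).items.filter
        (fun p => (s.foldl (fun d entity => d.insert entity.2.1 entity.2.2.1) PySem.Dict.empty).get? p.1 == some p.2)).map
        (fun p => (("" : String), p.1, p.2, (0 : Int)))) := rfl
  rw [hA, hB]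
  set wd : PySem.Dict Int Int := w.foldl (fun d entity => d.insert entity.2.1 entity.2.2.1) PySem.Dict.empty with hwd
  set sd : PySem.Dict Int Int := s.foldl (fun d entity => d.insert entity.2.1 entity.2.2.1) PySem.Dict.empty with hsd
  have hwk : ((wd.items.map (·.1)) : List Int).Nodup := by
    have := PySem.Dict.nodup_keys_foldl_insert_key w (fun e => e.2.1) (fun d e => e.2.2.1)
      PySem.Dict.empty PySem.Dict.nodup_keys_empty
    simpa [PySem.Dict.keys] using this
  have hsk : ((sd.items.map (·.1)) : List Int).Nodup := by
    have := PySem.Dict.nodup_keys_foldl_insert_key s (fun e => e.2.1) (fun d e => e.2.2.1)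
      PySem.Dict.empty PySem.Dict.nodup_keys_empty
    simpa [PySem.Dict.keys] using this
  set d1 : PySem.Dict Int (PySem.Dict Int (List Int)) :=
    wd.items.foldl
      (fun d p => d.modify p.1 PySem.Dict.empty (fun inner => inner.modify p.2 [] (· ++ [1])))
      PySem.Dict.empty with hd1
  have h1 : d1.items = wd.items.map pvG1 := by
    rw [hd1, pv_loop1_items wd.items PySem.Dict.empty (fun p _ => PySem.Dict.contains_empty _) hwk]
    simp [PySem.Dict.empty]
  have hd1k : d1.keys.Nodup := by
    show ((d1.items.map (·.1)) : List Int).Nodup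
    rw [h1, List.map_map]
    simpa [Function.comp, pvG1] using hwk
  have h2 := pv_loop2_items sd.items d1 hsk hd1k
  rw [h1] at h2
  rw [h2, List.map_map]
  have hcont_iff : ∀ x : Int × Int,
      d1.contains x.1 = wd.items.any (fun p => p.1 == x.1) := by
    intro x
    rw [PySem.Dict.contains, h1, List.any_map]
    rfl
  have hXfst : (wd.items.map (pvU sd.items ∘ pvG1)).map (·.1) = wd.items.map (·.1) := by
    rw [List.map_map]
    apply List.map_congr_left
    intro p _
    rcases hf : sd.items.find? (fun q => q.1 == p.1) with _ | q <;>
      simp [Function.comp, pvU, pvG1, hf]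
  have hal : (((wd.items.map (pvU sd.items ∘ pvG1))
        ++ (sd.items.filter (fun q => !d1.contains q.1)).map pvG1).map (·.1)).Nodup := by
    rw [List.map_append, hXfst, List.map_map]
    have hYfst : ((sd.items.filter (fun q => !d1.contains q.1)).map ((·.1) ∘ pvG1))
        = (sd.items.filter (fun q => !d1.contains q.1)).map (·.1) := by
      apply List.map_congr_left; intro q _; simp [Function.comp, pvG1]
    rw [hYfst, List.nodup_append]
    refine ⟨hwk, (List.filter_sublist.map (fun x : Int × Int => x.1)).nodup hsk, ?_⟩
    intro a ha b hb hab
    subst hab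
    obtain ⟨q, hqmem, hqfst⟩ := List.mem_map.mp hb
    have hqf := List.mem_filter.mp hqmem
    have hqc : d1.contains q.1 = false := by simpa using hqf.2
    rw [hcont_iff q] at hqc
    obtain ⟨x, hx, hxa⟩ := List.mem_map.mp ha
    have hany : wd.items.any (fun p => p.1 == q.1) = true :=
      List.any_eq_true.mpr ⟨x, hx, by simp [hxa, hqfst]⟩
    rw [hqc] at hany
    exact absurd hany (by simp)
  have h3 := pv_loop3_items _ PySem.Dict.empty (fun p _ => PySem.Dict.contains_empty _) hal
  rw [h3]
  rw [List.filterMap_append, List.filterMap_map, List.filterMap_map]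
  have hY : ((sd.items.filter (fun q => !d1.contains q.1)).filterMap (pvPick ∘ pvG1)) = [] := by
    rw [List.filterMap_eq_nil_iff]
    intro q _
    exact pv_pick_single q
  have hX : (wd.items.filterMap (pvPick ∘ (pvU sd.items ∘ pvG1)))
      = wd.items.filterMap (fun p =>
          if (sd.get? p.1 == some p.2) then some (p.1, p.2) else none) := by
    apply List.filterMap_congr
    intro p _
    exact pv_pointwise sd.items p
  rw [hY, hX, pv_filterMap_if wd.items (fun p => (sd.get? p.1 == some p.2)) (fun p => (p.1, p.2))]
  simp [PySem.Dict.empty]
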